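-- pv_equiv track=rewrite | github.com/openstack/nova | nova/objects/instance.py | _expected_cols
-- ===== SOURCE A (Python) =====
-- _INSTANCE_OPTIONAL_JOINED_FIELDS = ['metadata', 'system_metadata',
--                                     'info_cache', 'security_groups',
--                                     'pci_devices', 'tags', 'services',
--                                     'fault']
--
-- _INSTANCE_EXTRA_FIELDS = ['numa_topology', 'pci_requests',
--                           'flavor', 'vcpu_model', 'migration_context',
--                           'keypairs', 'device_metadata', 'trusted_certs',
--                           'resources']
--
-- def _expected_cols(expected_attrs):
--     """Return expected_attrs that are columns needing joining.
--
--     NB: This function may modify expected_attrs if one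
--     requested attribute requires another.
--     """
--     if not expected_attrs:
--         return expected_attrs
--
--     simple_cols = [attr for attr in expected_attrs
--                    if attr in _INSTANCE_OPTIONAL_JOINED_FIELDS]
--
--     complex_cols = ['extra.%s' % field
--                     for field in _INSTANCE_EXTRA_FIELDS
--                     if field in expected_attrs]
--     if complex_cols:
--         simple_cols.append('extra')
--     simple_cols = [x for x in simple_cols if x not in _INSTANCE_EXTRA_FIELDS]
--     expected_cols = simple_cols + complex_cols
--     # NOTE(pumaranikar): expected_cols list can contain duplicates since
--     # caller appends column attributes to expected_attr without checking if
--     # it is already present in the list or not. Hence, we remove duplicates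
--     # here, if any. The resultant list is sorted based on list index to
--     # maintain the insertion order.
--     return sorted(list(set(expected_cols)), key=expected_cols.index)
-- ===== SOURCE B (Python) =====
-- _INSTANCE_OPTIONAL_JOINED_FIELDS = ['metadata', 'system_metadata',
--                                     'info_cache', 'security_groups',
--                                     'pci_devices', 'tags', 'services',
--                                     'fault']
--
-- _INSTANCE_EXTRA_FIELDS = ['numa_topology', 'pci_requests',
--                           'flavor', 'vcpu_model', 'migration_context',
--                           'keypairs', 'device_metadata', 'trusted_certs',
--                           'resources']
--
--
-- def _expected_cols(expected_attrs):
--     """Return expected_attrs that are columns needing joining."""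
--     if not expected_attrs:
--         return expected_attrs
--     # One order-preserving pass: emit each joined column the first time it is
--     # seen; the extra.* columns are appended afterwards (they are fresh by
--     # construction), so no sort/set/index dedup pass is needed at the end.
--     seen = set()
--     cols = []
--     for attr in expected_attrs:
--         if attr in _INSTANCE_OPTIONAL_JOINED_FIELDS and attr not in seen:
--             seen.add(attr)
--             cols.append(attr)
--     extra_cols = ['extra.%s' % field for field in _INSTANCE_EXTRA_FIELDS
--                   if field in expected_attrs]
--     if extra_cols:
--         cols.append('extra')
--         cols.extend(extra_cols)
--     return cols
-- ===== Notes on version B (the rewrite author's own statement) =====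
-- stated objective: idiomatic
-- what changed: B replaces A's build-then-dedupe pipeline (append 'extra' to simple_cols, a no-op filter against _INSTANCE_EXTRA_FIELDS, concatenation, then sorted(list(set(...)), key=list.index)) with a single order-preserving first-seen pass over expected_attrs plus a direct append of the fresh 'extra'/'extra.*' columns, so no sort/set/index dedup pass exists at all.
import Mathlib
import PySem

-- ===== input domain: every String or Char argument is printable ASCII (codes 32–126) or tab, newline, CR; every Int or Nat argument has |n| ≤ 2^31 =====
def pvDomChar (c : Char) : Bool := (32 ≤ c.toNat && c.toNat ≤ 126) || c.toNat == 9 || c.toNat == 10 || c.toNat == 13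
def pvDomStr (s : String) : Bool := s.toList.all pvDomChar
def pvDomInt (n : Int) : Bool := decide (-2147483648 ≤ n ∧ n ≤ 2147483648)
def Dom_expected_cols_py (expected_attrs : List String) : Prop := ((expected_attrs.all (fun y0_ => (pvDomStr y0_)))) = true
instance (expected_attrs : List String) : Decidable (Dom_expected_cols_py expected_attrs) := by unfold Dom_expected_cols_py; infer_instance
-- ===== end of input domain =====

-- B replaces A's final sorted(list(set(...)), key=list.index) dedup (and the no-op
-- extra-fields filter) by a single order-preserving first-seen pass; same return value.

def pvOptJoined : List String := ["metadata", "system_metadata", "info_cache", "security_groups",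
                                  "pci_devices", "tags", "services", "fault"]

def pvExtraFields : List String := ["numa_topology", "pci_requests", "flavor", "vcpu_model",
                                    "migration_context", "keypairs", "device_metadata",
                                    "trusted_certs", "resources"]

-- ===== PORT A =====
-- list(set(ec)) iterates a Python set in hash order, which PySem does not model; the
-- subsequent sorted(..., key=ec.index) applies a key that is injective on the distinct
-- elements, so the result is independent of that order and the port uses the Set's list.
-- ec.index(x) is only evaluated on members of ec, where '(index? ec x).getD 0' is exact.
def expected_cols_py (expected_attrs : List String) : List String :=
  if expected_attrs = [] then expected_attrs
  else
    let simple_cols := expected_attrs.filter (fun attr => pvOptJoined.contains attr)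
    let complex_cols := (pvExtraFields.filter (fun field => expected_attrs.contains field)).map
        (fun field => "extra." ++ field)
    let simple_cols := if complex_cols ≠ [] then simple_cols ++ ["extra"] else simple_cols
    let simple_cols := simple_cols.filter (fun x => !(pvExtraFields.contains x))
    let expected_cols := simple_cols ++ complex_cols
    PySem.List.sorted (PySem.Set.ofList expected_cols)
      (fun x => (PySem.List.index? expected_cols x).getD 0) false

-- ===== PORT B =====
def expected_cols_py_alt (expected_attrs : List String) : List String :=
  if expected_attrs = [] then expected_attrs
  else
    let st := expected_attrs.foldl
        (fun (st : PySem.Set String × List String) attr =>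
          if pvOptJoined.contains attr && !(PySem.Set.contains st.1 attr) then
            (PySem.Set.add st.1 attr, st.2 ++ [attr])
          else st)
        (PySem.Set.empty, [])
    let cols := st.2
    let extra_cols := (pvExtraFields.filter (fun field => expected_attrs.contains field)).map
        (fun field => "extra." ++ field)
    if extra_cols ≠ [] then cols ++ ["extra"] ++ extra_cols else cols

-- ===== PRECONDITION & SPEC =====
def Spec_expected_cols_py (expected_attrs : List String) (out : List String) : Prop := out = expected_cols_py_alt expected_attrs
instance (expected_attrs : List String) (out : List String) : Decidable (Spec_expected_cols_py expected_attrs out) := by unfold Spec_expected_cols_py; infer_instance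

-- ===== CLAIM (what is proved, stated in full; the proofs are below) =====
def Claim_equal_expected_cols_py : Prop := ∀ (expected_attrs : List String), Dom_expected_cols_py expected_attrs → Spec_expected_cols_py expected_attrs (expected_cols_py expected_attrs)

-- ===== LEMMAS AND PROOFS =====

-- For a member, Python's ec.index(x) as ported equals List.idxOf.
theorem pv_key_eq_idxOf (L : List String) (a : String) (ha : a ∈ L) :
    (PySem.List.index? L a).getD 0 = L.idxOf a := by
  rcases (PySem.List.index?_isSome_iff L a).mpr ha with h
  rcases Option.isSome_iff_exists.mp h with ⟨k, hk⟩
  rw [hk]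
  have := List.idxOf_eq_getD_idxOf? a L
  rw [PySem.List.index?_eq_idxOf?] at hk
  rw [this, hk]
  rfl

-- first-occurrence indices strictly increase along PySem.Set.ofList
theorem pv_foldl_add_pairwise (L : List String) :
    ∀ (rest pre acc : List String), L = pre ++ rest →
      (∀ a, a ∈ acc ↔ a ∈ pre) →
      acc.Pairwise (fun a b => L.idxOf a < L.idxOf b) →
      (List.foldl PySem.Set.add acc rest).Pairwise (fun a b => L.idxOf a < L.idxOf b) := by
  intro rest
  induction rest with
  | nil => intro pre acc _ _ hp; simpa using hp
  | cons x rest ih =>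
    intro pre acc hL hmem hp
    simp only [List.foldl_cons]
    by_cases hx : x ∈ acc
    · have : PySem.Set.add acc x = acc := PySem.Set.add_of_mem hx
      rw [this]
      refine ih (pre ++ [x]) acc (by simpa using hL) ?_ hp
      intro a
      constructor
      · intro ha; exact List.mem_append_left _ ((hmem a).mp ha)
      · intro ha
        rcases List.mem_append.mp ha with h | h
        · exact (hmem a).mpr h
        · simp at h; subst h; exact hx
    · have : PySem.Set.add acc x = acc ++ [x] := PySem.Set.add_of_not_mem hx
      rw [this]
      refine ih (pre ++ [x]) (acc ++ [x]) (by simpa using hL) ?_ ?_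
      · intro a; simp [hmem a]
      · rw [List.pairwise_append]
        refine ⟨hp, by simp, ?_⟩
        intro a ha b hb
        have hb' : b = x := by simpa using hb
        rw [hb']
        have hapre : a ∈ pre := (hmem a).mp ha
        have hxpre : x ∉ pre := fun h => hx ((hmem x).mpr h)
        subst hL
        rw [List.idxOf_append, List.idxOf_append, if_pos hapre, if_neg hxpre]
        have h1 : pre.idxOf a < pre.length := List.idxOf_lt_length_of_mem hapre
        omega

theorem pv_ofList_pairwise (L : List String) :
    (PySem.Set.ofList L).Pairwise (fun a b => L.idxOf a < L.idxOf b) := by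
  rw [PySem.Set.ofList_eq_foldl]
  exact pv_foldl_add_pairwise L L [] [] rfl (by simp) (by simp)

-- A's dedup step: sorted(set(L), key=L.index) is the order-preserving dedup of L.
theorem pv_sorted_set_eq_ofList (L : List String) :
    PySem.List.sorted (PySem.Set.ofList L)
      (fun x => (PySem.List.index? L x).getD 0) false = PySem.Set.ofList L := by
  apply PySem.List.sorted_eq_of_perm_of_pairwise_lt _ _ _ (List.Perm.refl _)
  refine (pv_ofList_pairwise L).imp_of_mem ?_
  intro a b ha hb h
  have ha' : a ∈ L := (PySem.Set.mem_ofList L a).mp ha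
  have hb' : b ∈ L := (PySem.Set.mem_ofList L b).mp hb
  rw [pv_key_eq_idxOf L a ha', pv_key_eq_idxOf L b hb']
  exact h

-- appending pairwise-fresh nodup elements to a set keeps them verbatim
theorem pv_foldl_add_fresh :
    ∀ (E acc : List String), (∀ x ∈ E, x ∉ acc) → E.Nodup →
      List.foldl PySem.Set.add acc E = acc ++ E := by
  intro E
  induction E with
  | nil => simp
  | cons x E ih =>
    intro acc hfresh hnd
    have hx : x ∉ acc := hfresh x (by simp)
    simp only [List.foldl_cons, PySem.Set.add_of_not_mem hx]
    rw [ih (acc ++ [x]) ?_ (List.Nodup.of_cons hnd)]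
    · simp
    · intro y hy
      have h1 : y ∉ acc := hfresh y (by simp [hy])
      have h2 : y ≠ x := by
        intro h; subst h
        exact (List.nodup_cons.mp hnd).1 hy
      simp [h1, h2]

theorem pv_ofList_append_fresh (S E : List String) (h : ∀ x ∈ E, x ∉ S) (hnd : E.Nodup) :
    PySem.Set.ofList (S ++ E) = PySem.Set.ofList S ++ E := by
  rw [PySem.Set.ofList_eq_foldl, List.foldl_append, ← PySem.Set.ofList_eq_foldl]
  exact pv_foldl_add_fresh E (PySem.Set.ofList S) (fun x hx => by
    intro hc; exact h x hx ((PySem.Set.mem_ofList S x).mp hc)) hnd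

-- B's seen/cols loop carries the same list twice and computes the ordered dedup of the filter
theorem pv_loop_pair :
    ∀ (l : List String) (s : List String),
      l.foldl (fun (st : PySem.Set String × List String) attr =>
          if pvOptJoined.contains attr && !(PySem.Set.contains st.1 attr) then
            (PySem.Set.add st.1 attr, st.2 ++ [attr])
          else st) (s, s)
      = (l.foldl (fun acc attr => if pvOptJoined.contains attr then PySem.Set.add acc attr else acc) s,
         l.foldl (fun acc attr => if pvOptJoined.contains attr then PySem.Set.add acc attr else acc) s) := by
  intro l
  induction l with
  | nil => intro s; rfl
  | cons x l ih =>
    intro s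
    simp only [List.foldl_cons]
    by_cases hp : pvOptJoined.contains x
    · by_cases hm : x ∈ s
      · have hc : PySem.Set.contains s x = true := (PySem.Set.contains_iff s x).mpr hm
        have ha : PySem.Set.add s x = s := PySem.Set.add_of_mem hm
        simp only [hp, hc, ha, Bool.not_true, Bool.and_false, if_pos]
        simpa using ih s
      · have hc : PySem.Set.contains s x = false := by
          rw [← Bool.not_eq_true, PySem.Set.contains_iff]; exact hm
        have ha : PySem.Set.add s x = s ++ [x] := PySem.Set.add_of_not_mem hm
        simp only [hp, hc, ha, Bool.not_false, Bool.and_true, if_pos]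
        simpa using ih (s ++ [x])
    · simp only [Bool.not_eq_true] at hp
      rw [hp]
      simp only [Bool.false_and, Bool.false_eq_true, if_false]
      exact ih s

theorem pv_loop_eq_ofList_filter (ea : List String) :
    (ea.foldl (fun (st : PySem.Set String × List String) attr =>
        if pvOptJoined.contains attr && !(PySem.Set.contains st.1 attr) then
          (PySem.Set.add st.1 attr, st.2 ++ [attr])
        else st) (PySem.Set.empty, [])).2
    = PySem.Set.ofList (ea.filter (fun attr => pvOptJoined.contains attr)) := by
  have h := pv_loop_pair ea []
  have he : (PySem.Set.empty : PySem.Set String) = ([] : List String) := rfl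
  rw [he, h]
  rw [PySem.Set.ofList_eq_foldl, List.foldl_filter]

-- literal-list facts
theorem pv_opt_not_extra : ∀ a ∈ pvOptJoined, !(pvExtraFields.contains a) := by decide

theorem pv_extra_lit_not_opt :
    (pvExtraFields.all (fun f => !(pvOptJoined.contains ("extra." ++ f)))) = true := by decide

theorem pv_extra_lit_ne_extra :
    (pvExtraFields.all (fun f => !("extra" == "extra." ++ f))) = true := by decide

theorem pv_extra_not_opt : "extra" ∉ pvOptJoined := by decide

-- ===== VERDICT (by name: the statement is the Claim_ definition above) =====
theorem expected_cols_py_spec : Claim_equal_expected_cols_py := by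
  intro ea _
  unfold Spec_expected_cols_py expected_cols_py expected_cols_py_alt
  by_cases hne : ea = []
  · simp [hne]
  · simp only [if_neg hne]
    set S := ea.filter (fun attr => pvOptJoined.contains attr) with hS
    set C := (pvExtraFields.filter (fun field => ea.contains field)).map
        (fun field => "extra." ++ field) with hC
    -- facts about S and C
    have hS_opt : ∀ x ∈ S, pvOptJoined.contains x := by
      intro x hx; exact (List.mem_filter.mp hx).2
    have hC_shape : ∀ c ∈ C, ∃ f ∈ pvExtraFields, c = "extra." ++ f := by
      intro c hc
      rcases List.mem_map.mp hc with ⟨f, hf, hcf⟩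
      exact ⟨f, (List.mem_filter.mp hf).1, hcf.symm⟩
    have hC_not_opt : ∀ c ∈ C, ¬ pvOptJoined.contains c := by
      intro c hc
      rcases hC_shape c hc with ⟨f, hf, rfl⟩
      have := List.all_eq_true.mp pv_extra_lit_not_opt f hf
      simpa using this
    have hC_nodup : C.Nodup := by
      rw [hC]
      apply List.Nodup.map_on
      · intro f hf g hg hfg
        have h2 : ("extra." ++ f == "extra." ++ g) = (f == g) := by simp
        have h3 : ("extra." ++ f == "extra." ++ g) = true := beq_iff_eq.mpr hfg
        exact beq_iff_eq.mp (h2 ▸ h3)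
      · exact List.Nodup.filter _ (by decide)
    have hextra_notC : "extra" ∉ C := by
      intro hc
      rcases hC_shape _ hc with ⟨f, hf, hcf⟩
      have := List.all_eq_true.mp pv_extra_lit_ne_extra f hf
      simp only [Bool.not_eq_eq_eq_not, Bool.not_true, beq_eq_false_iff_ne] at this
      exact this hcf
    by_cases hCe : C = []
    · -- no complex columns: both sides are the ordered dedup of S
      have hnn : ¬(C ≠ []) := by simp [hCe]
      rw [if_neg hnn, if_neg hnn, hCe, List.append_nil]
      have hfilt : S.filter (fun x => !(pvExtraFields.contains x)) = S := by
        apply List.filter_eq_self.mpr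
        intro x hx
        exact pv_opt_not_extra x (by simpa using hS_opt x hx)
      rw [hfilt, pv_sorted_set_eq_ofList, pv_loop_eq_ofList_filter, hS]
    · -- complex columns present
      rw [if_pos hCe, if_pos hCe]
      have hfilt : (S ++ ["extra"]).filter (fun x => !(pvExtraFields.contains x))
          = S ++ ["extra"] := by
        apply List.filter_eq_self.mpr
        intro x hx
        rcases List.mem_append.mp hx with h | h
        · exact pv_opt_not_extra x (by simpa using hS_opt x h)
        · simp at h; subst h; decide
      rw [hfilt, pv_sorted_set_eq_ofList]
      have hfresh : ∀ x ∈ ("extra" :: C), x ∉ S := by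
        intro x hx hxS
        have hxopt := hS_opt x hxS
        rcases List.mem_cons.mp hx with rfl | hxc
        · exact pv_extra_not_opt (by simpa using hxopt)
        · exact hC_not_opt x hxc hxopt
      have hnd : ("extra" :: C).Nodup := List.nodup_cons.mpr ⟨hextra_notC, hC_nodup⟩
      have := pv_ofList_append_fresh S ("extra" :: C) hfresh hnd
      simp only [List.append_assoc, List.singleton_append]
      rw [this, pv_loop_eq_ofList_filter, hS]
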